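-- pv_equiv track=rewrite | github.com/rafaltrojniak/AdventOfCode | 2023/19/part2.py | agg_rules_into_ranges
-- ===== SOURCE A (Python) =====
-- def agg_rules_into_ranges(rules) -> dict:
--     ranges = {
--         'x': (1, 4000),
--         'm': (1, 4000),
--         'a': (1, 4000),
--         's': (1, 4000)
--     }
--     for name, function, value in rules:
--         if function == '<':
--             r = ranges[name]
--             ranges[name] = (r[0], min(r[1], value - 1))
--         elif function == '>':
--             r = ranges[name]
--             ranges[name] = (max(r[0], value + 1), r[1])
--     return ranges
-- ===== SOURCE B (Python) =====
-- def agg_rules_into_ranges(rules) -> dict: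
--     result = {}
--     for var in ('x', 'm', 'a', 's'):
--         lo = 1
--         hi = 4000
--         for n, f, v in rules:
--             if n == var:
--                 if f == '>':
--                     lo = max(lo, v + 1)
--                 elif f == '<':
--                     hi = min(hi, v - 1)
--         result[var] = (lo, hi)
--     return result
-- ===== Notes on version B (the rewrite author's own statement) =====
-- stated objective: alternative
-- what changed: B replaces A's single interleaved pass that mutates a running dict via name lookups by four independent per-variable (lo,hi) aggregations, assembling the result dict from them; Pre_ excludes only inputs where A raises KeyError (a '<'/'>' rule naming an unknown variable), where B returns the four default-aggregated ranges.
import Mathlib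
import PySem

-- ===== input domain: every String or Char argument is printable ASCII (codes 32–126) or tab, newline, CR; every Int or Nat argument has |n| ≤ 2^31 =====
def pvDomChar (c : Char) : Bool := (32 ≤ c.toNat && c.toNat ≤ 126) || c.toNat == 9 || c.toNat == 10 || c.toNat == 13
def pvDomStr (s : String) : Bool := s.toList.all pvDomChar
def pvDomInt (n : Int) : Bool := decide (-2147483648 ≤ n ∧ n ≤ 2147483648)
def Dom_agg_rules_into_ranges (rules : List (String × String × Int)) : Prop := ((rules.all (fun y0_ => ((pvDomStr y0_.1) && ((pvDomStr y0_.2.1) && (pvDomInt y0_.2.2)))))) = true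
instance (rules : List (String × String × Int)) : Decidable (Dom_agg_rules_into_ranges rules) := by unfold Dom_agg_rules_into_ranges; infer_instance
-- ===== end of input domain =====

-- B replaces A's single interleaved dict-mutating pass by four independent per-variable
-- (lo, hi) aggregations (objective: alternative decomposition, same cost).
-- ===== PORT A =====
-- one loop step of A; '(get? name).getD (0,0)' stands for 'ranges[name]': under Pre_ the
-- key is always present, so the default is never used (Python raises KeyError there).
def aggStepA (ranges : PySem.Dict String (Int × Int)) (rule : String × String × Int) :
    PySem.Dict String (Int × Int) :=
  let (name, function, value) := rule
  if function = "<" then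
    let r := (ranges.get? name).getD (0, 0)
    ranges.insert name (r.1, min r.2 (value - 1))
  else if function = ">" then
    let r := (ranges.get? name).getD (0, 0)
    ranges.insert name (max r.1 (value + 1), r.2)
  else ranges

def agg_rules_into_ranges (rules : List (String × String × Int)) : List (String × Int × Int) :=
  (rules.foldl aggStepA
    (PySem.Dict.mk [("x", ((1 : Int), (4000 : Int))), ("m", (1, 4000)),
                    ("a", (1, 4000)), ("s", (1, 4000))])).items

-- ===== PORT B =====
-- inner loop of Source B: fold a (lo, hi) accumulator over the rules for one variable
def aggStepB (var : String) (acc : Int × Int) (rule : String × String × Int) : Int × Int :=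
  let (n, f, v) := rule
  if n = var then
    if f = ">" then (max acc.1 (v + 1), acc.2)
    else if f = "<" then (acc.1, min acc.2 (v - 1))
    else acc
  else acc

def agg_rules_into_ranges_alt (rules : List (String × String × Int)) : List (String × Int × Int) :=
  ["x", "m", "a", "s"].map (fun var => (var, rules.foldl (aggStepB var) (1, 4000)))

-- ===== PRECONDITION & SPEC =====
-- Pre_ excludes inputs on which Python A raises KeyError: a '<' or '>' rule naming a
-- variable other than x/m/a/s indexes a missing dict key.
def Pre_agg_rules_into_ranges (rules : List (String × String × Int)) : Prop :=
  ∀ r ∈ rules, (r.2.1 = "<" ∨ r.2.1 = ">") → r.1 ∈ (["x", "m", "a", "s"] : List String)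
instance (rules : List (String × String × Int)) : Decidable (Pre_agg_rules_into_ranges rules) := by unfold Pre_agg_rules_into_ranges; infer_instance
def pvWitness_agg_rules_into_ranges : (List (String × String × Int)) :=
  [("x", "<", 100), ("m", ">", 7), ("a", "!", 5), ("x", ">", 2)]

def Spec_agg_rules_into_ranges (rules : List (String × String × Int)) (out : List (String × Int × Int)) : Prop := out = agg_rules_into_ranges_alt rules
instance (rules : List (String × String × Int)) (out : List (String × Int × Int)) : Decidable (Spec_agg_rules_into_ranges rules out) := by unfold Spec_agg_rules_into_ranges; infer_instance

-- ===== CLAIM (what is proved, stated in full; the proofs are below) =====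
def Claim_equal_agg_rules_into_ranges : Prop := ∀ (rules : List (String × String × Int)), Dom_agg_rules_into_ranges rules → Pre_agg_rules_into_ranges rules → Spec_agg_rules_into_ranges rules (agg_rules_into_ranges rules)

-- ===== LEMMAS AND PROOFS =====

-- A's dict fold from the 4-key state equals the four per-variable component folds.
theorem foldA_eq (rules : List (String × String × Int))
    (hpre : Pre_agg_rules_into_ranges rules) (px pm pa ps : Int × Int) :
    rules.foldl aggStepA
      (PySem.Dict.mk [("x", px), ("m", pm), ("a", pa), ("s", ps)]) =
    PySem.Dict.mk [("x", rules.foldl (aggStepB "x") px),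
                   ("m", rules.foldl (aggStepB "m") pm),
                   ("a", rules.foldl (aggStepB "a") pa),
                   ("s", rules.foldl (aggStepB "s") ps)] := by
  induction rules generalizing px pm pa ps with
  | nil => rfl
  | cons r rs ih =>
    obtain ⟨n, f, v⟩ := r
    have hpre' : Pre_agg_rules_into_ranges rs := fun r hr => hpre r (List.mem_cons_of_mem _ hr)
    by_cases hlt : f = "<"
    · have hn : n ∈ (["x", "m", "a", "s"] : List String) :=
        hpre _ (List.mem_cons_self) (Or.inl hlt)
      simp only [List.mem_cons, List.not_mem_nil, or_false] at hn
      rcases hn with h | h | h | h <;> subst h <;>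
        simp [List.foldl_cons, aggStepA, aggStepB, hlt, PySem.Dict.get?,
              PySem.Dict.insert, PySem.Dict.contains, ih hpre']
    · by_cases hgt : f = ">"
      · have hn : n ∈ (["x", "m", "a", "s"] : List String) :=
          hpre _ (List.mem_cons_self) (Or.inr hgt)
        simp only [List.mem_cons, List.not_mem_nil, or_false] at hn
        rcases hn with h | h | h | h <;> subst h <;>
          simp [List.foldl_cons, aggStepA, aggStepB, hgt, PySem.Dict.get?,
                PySem.Dict.insert, PySem.Dict.contains, ih hpre']
      · simp [List.foldl_cons, aggStepA, aggStepB, hlt, hgt, ih hpre']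

-- ===== VERDICT (by name: the statement is the Claim_ definition above) =====
theorem agg_rules_into_ranges_spec : Claim_equal_agg_rules_into_ranges := by
  intro rules _ hpre
  unfold Spec_agg_rules_into_ranges agg_rules_into_ranges agg_rules_into_ranges_alt
  rw [foldA_eq rules hpre]
  rfl
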